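-- pv_equiv track=rewrite | github.com/v-pun215/zcoc | cses/cses_12.py | solve
-- ===== SOURCE A (Python) =====
-- def solve(S):
--     N = len(S)
--     ans = [' '] * N
--
--     # frequency array to count the occurrence of each character
--     freq = [0] * 26
--     for i in range(N):
--         freq[ord(S[i]) - ord('A')] += 1
--
--     # Count the number of characters having odd frequency
--     cnt = 0
--     for i in range(26):
--         if freq[i] % 2 != 0:
--             cnt += 1
--
--     # If more than one character has odd frequency, then no solution exists
--     if cnt > 1:
--         return "NO SOLUTION"
--
--     left, right = 0, N - 1
--     for i in range(N):
--         if freq[ord(S[i]) - ord('A')] % 2 == 1: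
--             ans[N // 2] = S[i]
--             freq[ord(S[i]) - ord('A')] -= 1
--         while freq[ord(S[i]) - ord('A')] > 0:
--             ans[left] = ans[right] = S[i]
--             left += 1
--             right -= 1
--             freq[ord(S[i]) - ord('A')] -= 2
--
--     return ''.join(ans)
-- ===== SOURCE B (Python) =====
-- def solve(S):
--     # Count into the same 26-slot array A uses; indexing raises IndexError
--     # exactly where A's does (with Python's negative-index wraparound).
--     freq = [0] * 26
--     for c in S:
--         freq[ord(c) - ord('A')] += 1
--
--     if sum(f % 2 for f in freq) > 1:
--         return "NO SOLUTION"
--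
--     half = []
--     mid = ''
--     seen = [False] * 26
--     for c in S:
--         idx = ord(c) - ord('A')
--         if not seen[idx]:
--             seen[idx] = True
--             half.append(c * (freq[idx] // 2))
--             if freq[idx] % 2 == 1:
--                 mid = c
--     h = ''.join(half)
--     return h + mid + h[::-1]
-- ===== Notes on version B (the rewrite author's own statement) =====
-- stated objective: alternative
-- what changed: Instead of preallocating the answer array and filling it with two inward-moving left/right pointers plus a nested draining while-loop over a mutated frequency array, B builds the left half once by scanning S for first-occurrence slots (appending c*(freq//2)), records the middle character, and returns half + mid + reversed(half).
import Mathlib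
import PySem

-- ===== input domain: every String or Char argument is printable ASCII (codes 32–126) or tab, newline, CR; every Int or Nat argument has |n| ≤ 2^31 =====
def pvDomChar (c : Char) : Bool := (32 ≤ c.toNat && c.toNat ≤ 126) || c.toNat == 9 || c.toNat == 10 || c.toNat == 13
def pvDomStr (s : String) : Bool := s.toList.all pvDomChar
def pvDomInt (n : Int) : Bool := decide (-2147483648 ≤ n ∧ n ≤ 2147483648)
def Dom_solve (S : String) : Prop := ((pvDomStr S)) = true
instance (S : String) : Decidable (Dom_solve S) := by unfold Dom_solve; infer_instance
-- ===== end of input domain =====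

-- B rebuilds the palindrome as half ++ mid ++ reverse(half) from first-occurrence slots instead of
-- filling a preallocated array with two inward-moving pointers; same cost, different decomposition.

-- ===== PORT A =====

-- Needed by the port's termination argument (cited in decreasing_by): writing then reading the
-- same in-range index returns the written value (exact for Python list assignment/lookup).
theorem pyGetD_pySetD_self {α : Type} (f : List α) (i : Int) (v d : α)
    (h : PySem.Raise.InRange f.length i) :
    PySem.List.pyGetD (PySem.List.pySetD f i v) i d = v := by
  obtain ⟨hl, hr⟩ := h
  unfold PySem.List.pyGetD PySem.List.pyGet? PySem.List.pySetD PySem.List.pySet? PySem.List.pyIdx?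
  split_ifs <;> (try omega) <;>
    simp_all [Option.bind] <;>
    rw [List.getElem?_set_self (by omega)] <;> rfl

theorem pyGetD_out_of_range {α : Type} (f : List α) (i : Int) (d : α)
    (h : ¬ PySem.Raise.InRange f.length i) :
    PySem.List.pyGetD f i d = d := by
  rw [PySem.List.pyGetD, (PySem.List.pyGet?_eq_none_iff f i).2 h]
  rfl

-- 'while freq[idx] > 0: ans[left] = ans[right] = S[i]; left += 1; right -= 1; freq[idx] -= 2'
def solveWhile (c : Char) (idx : Int) (ans : List Char) (left right : Int) (f : List Int) :
    List Char × Int × Int × List Int :=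
  if h : 0 < PySem.List.pyGetD f idx 0 then
    solveWhile c idx (PySem.List.pySetD (PySem.List.pySetD ans left c) right c) (left + 1) (right - 1)
      (PySem.List.pySetD f idx (PySem.List.pyGetD f idx 0 - 2))
  else (ans, left, right, f)
termination_by (PySem.List.pyGetD f idx 0).toNat
decreasing_by
  have hin : PySem.Raise.InRange f.length idx := by
    by_contra hni
    rw [pyGetD_out_of_range f idx 0 hni] at h
    exact absurd h (by norm_num)
  have hv : PySem.List.pyGetD (PySem.List.pySetD f idx (PySem.List.pyGetD f idx 0 - 2)) idx 0
      = PySem.List.pyGetD f idx 0 - 2 :=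
    pyGetD_pySetD_self _ idx _ 0 (by simpa using hin)
  rw [hv]
  omega

def solve (S : String) : String :=
  let l := S.toList
  let N : Int := (l.length : Int)
  let ans0 : List Char := List.replicate l.length ' '
  let freq : List Int := (PySem.List.pyRange 0 N 1).foldl
    (fun f i =>
      let idx : Int := (((PySem.List.pyGetD l i ' ').toNat : Int)) - 65
      PySem.List.pySetD f idx (PySem.List.pyGetD f idx 0 + 1))
    (List.replicate 26 0)
  let cnt : Int := (PySem.List.pyRange 0 26 1).foldl
    (fun cnt i => if PySem.Int.mod (PySem.List.pyGetD freq i 0) 2 ≠ 0 then cnt + 1 else cnt) 0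
  if 1 < cnt then "NO SOLUTION"
  else
    let st := (PySem.List.pyRange 0 N 1).foldl
      (fun (st : List Char × Int × Int × List Int) i =>
        let (ans, left, right, f) := st
        let c := PySem.List.pyGetD l i ' '
        let idx : Int := ((c.toNat : Int)) - 65
        let (ans, f) :=
          if PySem.Int.mod (PySem.List.pyGetD f idx 0) 2 = 1 then
            (PySem.List.pySetD ans (PySem.Int.floordiv N 2) c,
             PySem.List.pySetD f idx (PySem.List.pyGetD f idx 0 - 1))
          else (ans, f)
        solveWhile c idx ans left right f)
      (ans0, 0, N - 1, freq)
    String.ofList st.1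

-- ===== PORT B =====
def solve_alt (S : String) : String :=
  let l := S.toList
  let freq : List Int := l.foldl
    (fun f c =>
      let idx : Int := ((c.toNat : Int)) - 65
      PySem.List.pySetD f idx (PySem.List.pyGetD f idx 0 + 1))
    (List.replicate 26 0)
  if 1 < (freq.map (fun x => PySem.Int.mod x 2)).sum then "NO SOLUTION"
  else
    let st := l.foldl
      (fun (st : List Bool × List Char × List Char) c =>
        let (seen, half, mid) := st
        let idx : Int := ((c.toNat : Int)) - 65
        if PySem.List.pyGetD seen idx false then (seen, half, mid)
        else
          (PySem.List.pySetD seen idx true,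
           half ++ PySem.List.pyRepeat [c] (PySem.Int.floordiv (PySem.List.pyGetD freq idx 0) 2),
           if PySem.Int.mod (PySem.List.pyGetD freq idx 0) 2 = 1 then [c] else mid))
      (List.replicate 26 false, [], [])
    String.ofList (st.2.1 ++ st.2.2 ++ st.2.1.reverse)

-- ===== PRECONDITION & SPEC =====
-- A indexes the 26-slot array at ord(c)-65; Pre_ admits exactly the characters (codes 39..90)
-- for which that index is in range after Python's negative wraparound — elsewhere A (and B)
-- raises IndexError.
def Pre_solve (S : String) : Prop :=
  (S.toList.all (fun c => decide (39 ≤ c.toNat ∧ c.toNat ≤ 90))) = true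
instance (S : String) : Decidable (Pre_solve S) := by unfold Pre_solve; infer_instance
def pvWitness_solve : String := "AABBC"

def Spec_solve (S : String) (out : String) : Prop := out = solve_alt S
instance (S : String) (out : String) : Decidable (Spec_solve S out) := by unfold Spec_solve; infer_instance

-- ===== CLAIM (what is proved, stated in full; the proofs are below) =====
def Claim_equal_solve : Prop := ∀ (S : String), Dom_solve S → Pre_solve S → Spec_solve S (solve S)

-- ===== LEMMAS AND PROOFS =====

-- slot of character c in the 26-entry array (A reaches it by negative wraparound)
def nidx (c : Char) : Nat := (((c.toNat : Int) - 65).emod 26).toNat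

def cntSlot (s : List Char) (j : Nat) : Nat := s.countP (fun c => nidx c == j)

-- 'seen[j]' for B's 26-entry boolean list
def sget (seen : List Bool) (j : Nat) : Bool := seen.getD j false

def unseenCnt (s : List Char) (seen : List Bool) : Nat :=
  s.countP (fun c => !(sget seen (nidx c)))

def oddU (s : List Char) (seen : List Bool) : Nat :=
  (List.range 26).countP (fun (k : Nat) => !(sget seen k) && decide (cntSlot s k % 2 = 1))

def regLen (s : List Char) (seen : List Bool) (mo : Option Char) : Nat :=
  unseenCnt s seen + (if mo.isSome then 1 else 0)

-- the untouched middle region of A's answer array: blanks, with the odd character at the centre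
def midreg (L : Nat) (mo : Option Char) : List Char :=
  match mo with
  | none => List.replicate L ' '
  | some ch => (List.replicate L ' ').set (L / 2) ch

-- char-level forms of the two main loop bodies (the pyRange bridges below show the ports' folds reduce to them)
def stepA2 (N : Int) (st : List Char × Int × Int × List Int) (c : Char) :
    List Char × Int × Int × List Int :=
  let (ans, left, right, f) := st
  let idx : Int := ((c.toNat : Int)) - 65
  let (ans, f) :=
    if PySem.Int.mod (PySem.List.pyGetD f idx 0) 2 = 1 then
      (PySem.List.pySetD ans (PySem.Int.floordiv N 2) c,
       PySem.List.pySetD f idx (PySem.List.pyGetD f idx 0 - 1))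
    else (ans, f)
  solveWhile c idx ans left right f

def stepB2 (freq : List Int) (st : List Bool × List Char × List Char) (c : Char) :
    List Bool × List Char × List Char :=
  let (seen, half, mid) := st
  let idx : Int := ((c.toNat : Int)) - 65
  if PySem.List.pyGetD seen idx false then (seen, half, mid)
  else
    (PySem.List.pySetD seen idx true,
     half ++ PySem.List.pyRepeat [c] (PySem.Int.floordiv (PySem.List.pyGetD freq idx 0) 2),
     if PySem.Int.mod (PySem.List.pyGetD freq idx 0) 2 = 1 then [c] else mid)

def stepF (f : List Int) (c : Char) : List Int :=
  PySem.List.pySetD f (((c.toNat : Int)) - 65)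
    (PySem.List.pyGetD f (((c.toNat : Int)) - 65) 0 + 1)

-- ---- indexing lemmas ----
theorem emod_as_mod (i m : Int) : i.emod m = i % m := rfl

theorem pyIdx_26 (i : Int) (h1 : -26 ≤ i) (h2 : i < 26) :
    PySem.List.pyIdx? 26 i = some (i.emod 26).toNat := by
  unfold PySem.List.pyIdx?
  rw [emod_as_mod]
  split_ifs <;> (try omega) <;> (congr 1; omega)

theorem pyGetD_mod26 {α : Type} (f : List α) (hf : f.length = 26) (i : Int)
    (h1 : -26 ≤ i) (h2 : i < 26) (d : α) :
    PySem.List.pyGetD f i d = f.getD (i.emod 26).toNat d := by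
  rw [PySem.List.pyGetD, PySem.List.pyGet?, hf, pyIdx_26 i h1 h2]
  simp [List.getD_eq_getElem?_getD]

theorem pySetD_mod26 {α : Type} (f : List α) (hf : f.length = 26) (i : Int)
    (h1 : -26 ≤ i) (h2 : i < 26) (v : α) :
    PySem.List.pySetD f i v = f.set (i.emod 26).toNat v := by
  rw [PySem.List.pySetD, PySem.List.pySet?, hf, pyIdx_26 i h1 h2]
  rfl

theorem nidx_lt (c : Char) : nidx c < 26 := by
  unfold nidx; rw [emod_as_mod]; omega

theorem idxA_range (c : Char) (h39 : 39 ≤ c.toNat) (h90 : c.toNat ≤ 90) :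
    -26 ≤ ((c.toNat : Int)) - 65 ∧ ((c.toNat : Int)) - 65 < 26 := by omega

theorem idxA_emod (c : Char) : ((((c.toNat : Int)) - 65).emod 26).toNat = nidx c := rfl

theorem getD_set {α : Type} (f : List α) (k j : Nat) (v d : α) (hk : k < f.length) :
    (f.set k v).getD j d = if k = j then v else f.getD j d := by
  simp only [List.getD_eq_getElem?_getD, List.getElem?_set]
  split_ifs with h1 h2 <;> simp_all

theorem sget_set_self (seen : List Bool) (k : Nat) (hk : k < seen.length) :
    sget (seen.set k true) k = true := by
  unfold sget; rw [getD_set seen k k true false hk, if_pos rfl]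

theorem sget_set_ne (seen : List Bool) (k j : Nat) (hk : k < seen.length) (h : k ≠ j) :
    sget (seen.set k true) j = sget seen j := by
  unfold sget; rw [getD_set seen k j true false hk, if_neg h]

theorem sget_replicate (n k : Nat) : sget (List.replicate n false) k = false := by
  unfold sget
  rw [List.getD_eq_getElem?_getD, List.getElem?_replicate]
  split_ifs <;> rfl

-- ---- generic counting lemmas ----
theorem countP_split {α : Type} (l : List α) (p q : α → Bool) :
    l.countP p = l.countP (fun a => p a && q a) + l.countP (fun a => p a && !q a) := by
  induction l with
  | nil => rfl
  | cons a t ih =>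
    simp only [List.countP_cons, ih]
    cases hp : p a <;> cases hq : q a <;> simp <;> omega

theorem two_le_countP {α : Type} (l : List α) (p : α → Bool) (x y : α)
    (hx : x ∈ l) (hy : y ∈ l) (hxy : x ≠ y) (hpx : p x) (hpy : p y) : 2 ≤ l.countP p := by
  induction l with
  | nil => simp at hx
  | cons a t ih =>
    rcases List.mem_cons.1 hx with rfl | hx'
    · have hyt : y ∈ t := by
        rcases List.mem_cons.1 hy with h | h
        · exact absurd h.symm hxy
        · exact h
      have h1 : 0 < t.countP p := List.countP_pos_iff.2 ⟨y, hyt, hpy⟩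
      rw [List.countP_cons, if_pos hpx]; omega
    · rcases List.mem_cons.1 hy with h | hy'
      · subst h
        have h1 : 0 < t.countP p := List.countP_pos_iff.2 ⟨x, hx', hpx⟩
        rw [List.countP_cons, if_pos hpy]; omega
      · have := ih hx' hy'
        rw [List.countP_cons]; omega

theorem list_countP_index (F : List Int) (p : Int → Bool) :
    F.countP p = (List.range F.length).countP (fun k => p (F.getD k 0)) := by
  induction F with
  | nil => rfl
  | cons a t ih =>
    rw [List.countP_cons, List.length_cons, List.range_succ_eq_map, List.countP_cons,
      List.countP_map]
    have h2 : List.countP ((fun k => p ((a :: t).getD k 0)) ∘ Nat.succ) (List.range t.length)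
        = List.countP (fun k => p (t.getD k 0)) (List.range t.length) :=
      List.countP_congr (fun k _ => by rfl)
    rw [h2, ← ih]
    rfl

-- ---- frequency counting ----
theorem stepF_eq (f : List Int) (hf : f.length = 26) (c : Char)
    (h39 : 39 ≤ c.toNat) (h90 : c.toNat ≤ 90) :
    stepF f c = f.set (nidx c) (f.getD (nidx c) 0 + 1) := by
  obtain ⟨ha1, ha2⟩ := idxA_range c h39 h90
  unfold stepF
  rw [pySetD_mod26 f hf _ ha1 ha2, pyGetD_mod26 f hf _ ha1 ha2, idxA_emod]

theorem freq_fold_len (s : List Char) (f : List Int) :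
    (s.foldl stepF f).length = f.length := by
  induction s generalizing f with
  | nil => rfl
  | cons c t ih => rw [List.foldl_cons, ih]; simp [stepF, PySem.List.length_pySetD]

theorem freq_fold_getD : ∀ (s : List Char) (f : List Int), f.length = 26 →
    (∀ c ∈ s, 39 ≤ c.toNat ∧ c.toNat ≤ 90) → ∀ (j : Nat), j < 26 →
    (s.foldl stepF f).getD j 0 = f.getD j 0 + (cntSlot s j : Int) := by
  intro s
  induction s with
  | nil => intro f hf _ j hj; simp [cntSlot]
  | cons c t ih =>
    intro f hf hs j hj
    obtain ⟨h39, h90⟩ := hs c List.mem_cons_self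
    rw [List.foldl_cons, ih (stepF f c) (by rw [stepF_eq f hf c h39 h90]; simp [hf])
      (fun c' hc' => hs c' (List.mem_cons_of_mem _ hc')) j hj]
    rw [stepF_eq f hf c h39 h90, getD_set f _ _ _ _ (by rw [hf]; exact nidx_lt c)]
    have : cntSlot (c :: t) j = cntSlot t j + if nidx c == j then 1 else 0 := by
      simp [cntSlot, List.countP_cons]
    rw [this]
    by_cases h : nidx c = j <;> simp [h] <;> push_cast <;> ring

-- B's odd-frequency sum equals A's odd-slot count
theorem sum_mod_eq_countP (F : List Int) :
    (F.map (fun x => PySem.Int.mod x 2)).sum =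
      ((F.countP (fun x => decide (PySem.Int.mod x 2 ≠ 0)) : Nat) : Int) := by
  induction F with
  | nil => rfl
  | cons a t ih =>
    rw [List.map_cons, List.sum_cons, ih, List.countP_cons]
    rcases PySem.Int.mod_two_eq a with h | h <;> rw [h] <;> simp [h] <;> push_cast <;> ring

-- ---- partition of the unseen count over the 26 slots ----
theorem unseenCnt_partition (s : List Char) (seen : List Bool) :
    unseenCnt s seen =
      ∑ k ∈ Finset.range 26, (if sget seen k then 0 else cntSlot s k) := by
  induction s with
  | nil =>
    have : ∀ k ∈ Finset.range 26,
        (if sget seen k then 0 else cntSlot ([] : List Char) k) = 0 := by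
      intro k _; simp [cntSlot]
    rw [Finset.sum_congr rfl this]
    simp [unseenCnt]
  | cons c t ih =>
    have hm : nidx c ∈ Finset.range 26 := Finset.mem_range.2 (nidx_lt c)
    have step : ∀ k ∈ Finset.range 26,
        (if sget seen k then 0 else cntSlot (c :: t) k)
        = (if sget seen k then 0 else cntSlot t k)
          + (if nidx c = k then (if sget seen (nidx c) then 0 else 1) else 0) := by
      intro k _
      have hc : cntSlot (c :: t) k = cntSlot t k + if nidx c == k then 1 else 0 := by
        simp [cntSlot, List.countP_cons]
      rw [hc]
      by_cases h : nidx c = k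
      · subst h
        cases hs : sget seen (nidx c) <;> simp
      · cases hs : sget seen k <;> simp [h]
    rw [Finset.sum_congr rfl step, Finset.sum_add_distrib, ← ih,
      Finset.sum_ite_eq (Finset.range 26) (nidx c)
        (fun _ => if sget seen (nidx c) then 0 else 1), if_pos hm]
    have : unseenCnt (c :: t) seen
        = unseenCnt t seen + (if sget seen (nidx c) then 0 else 1) := by
      unfold unseenCnt
      rw [List.countP_cons]
      cases hs : sget seen (nidx c) <;> simp
    rw [this]

theorem unseenCnt_odd (s : List Char) (seen : List Bool) (j : Nat) (hj : j < 26)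
    (hns : sget seen j = false)
    (hjo : cntSlot s j % 2 = 1)
    (hev : ∀ k, k < 26 → k ≠ j → sget seen k = false → cntSlot s k % 2 = 0) :
    unseenCnt s seen % 2 = 1 := by
  rw [unseenCnt_partition s seen]
  have hjm : j ∈ Finset.range 26 := Finset.mem_range.2 hj
  rw [← Finset.add_sum_erase _ _ hjm, if_neg (by rw [hns]; simp)]
  have hrest : (∑ k ∈ (Finset.range 26).erase j,
      (if sget seen k then 0 else cntSlot s k)) % 2 = 0 := by
    rw [Finset.sum_nat_mod]
    have : ∀ k ∈ (Finset.range 26).erase j,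
        (if sget seen k then 0 else cntSlot s k) % 2 = 0 := by
      intro k hk
      obtain ⟨hkj, hkr⟩ := Finset.mem_erase.1 hk
      cases hs : sget seen k with
      | true => simp
      | false => simpa using hev k (Finset.mem_range.1 hkr) hkj hs
    rw [Finset.sum_congr rfl this]
    simp
  omega

-- ---- list surgery for the answer array ----
theorem set_middle (u M v : List Char) (i : Nat) (hi : i < M.length) (c : Char) :
    (u ++ M ++ v).set (u.length + i) c = u ++ M.set i c ++ v := by
  rw [List.append_assoc, List.set_append, if_neg (by omega), Nat.add_sub_cancel_left,
    List.set_append, if_pos hi, List.append_assoc]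

theorem midreg_length (L : Nat) (mo : Option Char) : (midreg L mo).length = L := by
  cases mo <;> simp [midreg]

theorem repl_write (a : Nat) (c : Char) :
    ((List.replicate (a + 2) ' ').set 0 c).set (a + 1) c
      = c :: List.replicate a ' ' ++ [c] := by
  rw [show a + 2 = (a+1)+1 from rfl, List.replicate_succ, List.replicate_succ',
    List.set_cons_zero, List.set_cons_succ, List.set_append, if_neg (by simp),
    List.length_replicate, Nat.sub_self, List.set_cons_zero]
  rfl

theorem midreg_write (L : Nat) (mo : Option Char) (c : Char) (hL : 2 ≤ L)
    (hmo : mo.isSome = true → L % 2 = 1) :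
    ((midreg L mo).set 0 c).set (L - 1) c = c :: midreg (L - 2) mo ++ [c] := by
  cases mo with
  | none =>
    simp only [midreg]
    obtain ⟨a, rfl⟩ : ∃ a, L = a + 2 := ⟨L - 2, by omega⟩
    rw [show a + 2 - 1 = a + 1 from rfl, show a + 2 - 2 = a from rfl]
    exact repl_write a c
  | some ch =>
    have hodd := hmo rfl
    obtain ⟨b, rfl⟩ : ∃ b, L = 2*b+3 := ⟨(L-3)/2, by omega⟩
    simp only [midreg]
    rw [show (2*b+3)/2 = b + 1 by omega, show 2*b+3 - 1 = 2*b+2 by omega,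
      show 2*b+3 - 2 = 2*b+1 by omega, show (2*b+1)/2 = b by omega]
    rw [List.set_comm _ _ (by omega : b + 1 ≠ 0)]
    rw [List.set_comm _ _ (by omega : b + 1 ≠ 2*b+2)]
    have inner : ((List.replicate (2*b+3) ' ').set 0 c).set (2*b+2) c
        = c :: List.replicate (2*b+1) ' ' ++ [c] := by
      have := repl_write (2*b+1) c
      rw [show 2*b+1+2 = 2*b+3 by omega, show 2*b+1+1 = 2*b+2 by omega] at this
      exact this
    rw [inner, List.set_append, if_pos (by simp; omega), List.set_cons_succ]

-- ---- the while loop writes m mirrored pairs ----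
theorem solveWhile_spec (c : Char) (idx : Int) (h1 : -26 ≤ idx) (h2 : idx < 26) :
    ∀ (m : Nat) (u : List Char) (L : Nat) (mo : Option Char) (f : List Int),
    f.length = 26 →
    f.getD (idx.emod 26).toNat 0 = ((2 * m : Nat) : Int) →
    (mo.isSome = true → L % 2 = 1) →
    2 * m + (if mo.isSome then 1 else 0) ≤ L →
    solveWhile c idx (u ++ midreg L mo ++ u.reverse) ((u.length : Int))
        ((u.length : Int) + (L : Int) - 1) f
      = ((u ++ List.replicate m c) ++ midreg (L - 2 * m) mo ++ (u ++ List.replicate m c).reverse,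
         ((u.length : Int) + (m : Int)), ((u.length : Int) + (L : Int) - 1 - (m : Int)),
         f.set (idx.emod 26).toNat 0) := by
  have hjlt : (idx.emod 26).toNat < 26 := by rw [emod_as_mod]; omega
  intro m
  induction m with
  | zero =>
    intro u L mo f hf hget hpar hfit
    rw [solveWhile, dif_neg (by rw [pyGetD_mod26 f hf idx h1 h2, hget]; simp)]
    have hfs : f.set (idx.emod 26).toNat 0 = f := by
      apply List.ext_getElem (by simp)
      intro k hk1 hk2
      rw [List.getElem_set]
      split_ifs with he
      · subst he
        have : f.getD (idx.emod 26).toNat 0 = f[(idx.emod 26).toNat] :=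
          List.getD_eq_getElem f 0 (by omega)
        rw [← this, hget]; simp
      · rfl
    rw [hfs]
    simp
  | succ m ih =>
    intro u L mo f hf hget hpar hfit
    have hL2 : 2 ≤ L := by cases mo <;> simp at hfit <;> omega
    rw [solveWhile, dif_pos (by rw [pyGetD_mod26 f hf idx h1 h2, hget]; push_cast; omega)]
    have w1 : PySem.List.pySetD (u ++ midreg L mo ++ u.reverse) ((u.length : Int)) c
        = u ++ (midreg L mo).set 0 c ++ u.reverse := by
      rw [PySem.List.pySetD_of_nonneg _ _ (by positivity)]
      have := set_middle u (midreg L mo) u.reverse 0 (by rw [midreg_length]; omega) c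
      simpa using this
    have w2 : PySem.List.pySetD (u ++ (midreg L mo).set 0 c ++ u.reverse)
          ((u.length : Int) + (L : Int) - 1) c
        = u ++ ((midreg L mo).set 0 c).set (L - 1) c ++ u.reverse := by
      rw [PySem.List.pySetD_of_nonneg _ _ (by omega)]
      have ht : ((u.length : Int) + (L : Int) - 1).toNat = u.length + (L - 1) := by omega
      rw [ht]
      exact set_middle u _ u.reverse (L - 1) (by simp [midreg_length]; omega) c
    rw [w1, w2, midreg_write L mo c hL2 hpar]
    have wf : PySem.List.pySetD f idx (PySem.List.pyGetD f idx 0 - 2)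
        = f.set (idx.emod 26).toNat ((2 * m : Nat) : Int) := by
      rw [pySetD_mod26 f hf idx h1 h2, pyGetD_mod26 f hf idx h1 h2, hget]
      congr 1; push_cast; ring
    rw [wf]
    have happ := ih (u ++ [c]) (L - 2) mo (f.set (idx.emod 26).toNat ((2 * m : Nat) : Int))
      (by simp [hf])
      (by rw [getD_set f _ _ _ _ (by omega), if_pos rfl])
      (fun h => by have := hpar h; omega)
      (by cases mo <;> simp at hfit ⊢ <;> omega)
    have e1 : (u ++ [c]) ++ midreg (L - 2) mo ++ (u ++ [c]).reverse
        = u ++ (c :: midreg (L - 2) mo ++ [c]) ++ u.reverse := by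
      simp
    have e2 : (((u ++ [c]).length : Nat) : Int) = (u.length : Int) + 1 := by simp
    rw [e1, e2] at happ
    have f1 : (f.set (idx.emod 26).toNat ((2 * m : Nat) : Int)).set (idx.emod 26).toNat 0
        = f.set (idx.emod 26).toNat 0 := List.set_set _
    rw [f1] at happ
    rw [show ((u.length : Int) + (L : Int) - 1 - 1 : Int)
        = ((u.length : Int) + 1 + ((L - 2 : Nat) : Int) - 1 : Int) from by omega, happ]
    simp only [Prod.mk.injEq]
    refine ⟨?_, ?_, ?_, trivial⟩
    · simp [List.replicate_succ, show L - 2 - 2 * m = L - 2 * (m + 1) from by omega]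
    · omega
    · omega

-- ---- small facts used by the loop invariant ----
theorem mod2_cast (k : Nat) : PySem.Int.mod ((k : Nat) : Int) 2 = ((k % 2 : Nat) : Int) := by
  rw [show (2:Int) = ((2:Nat):Int) from rfl, PySem.Int.mod_natCast]

theorem floordiv2_cast (k : Nat) : PySem.Int.floordiv ((k : Nat) : Int) 2 = ((k / 2 : Nat) : Int) := by
  rw [show (2:Int) = ((2:Nat):Int) from rfl, PySem.Int.floordiv_natCast]

theorem cntSlot_cons (c : Char) (t : List Char) (j : Nat) :
    cntSlot (c :: t) j = cntSlot t j + if nidx c = j then 1 else 0 := by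
  simp [cntSlot, List.countP_cons]

theorem unseenCnt_cons (c : Char) (t : List Char) (seen : List Bool) :
    unseenCnt (c :: t) seen
      = unseenCnt t seen + (if sget seen (nidx c) then 0 else 1) := by
  unfold unseenCnt
  rw [List.countP_cons]
  cases hs : sget seen (nidx c) <;> simp

theorem cntSlot_le_unseen (s : List Char) (seen : List Bool) (j : Nat)
    (h : sget seen j = false) :
    cntSlot s j ≤ unseenCnt s seen := by
  apply List.countP_mono_left
  intro x _ hx
  have : nidx x = j := by simpa using hx
  rw [this, h]
  rfl

theorem unseen_add (s : List Char) (seen : List Bool) (hlen : seen.length = 26) (j : Nat)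
    (hj : j < 26) (h : sget seen j = false) :
    unseenCnt s (seen.set j true) + cntSlot s j = unseenCnt s seen := by
  have hsplit := countP_split s (fun c => !(sget seen (nidx c))) (fun c => nidx c == j)
  have e1 : s.countP (fun c => !(sget seen (nidx c)) && (nidx c == j))
      = cntSlot s j := by
    apply List.countP_congr
    intro x _
    by_cases hx : nidx x = j
    · rw [hx, h]; simp
    · simp [hx]
  have e2 : s.countP (fun c => !(sget seen (nidx c)) && !(nidx c == j))
      = unseenCnt s (seen.set j true) := by
    apply List.countP_congr
    intro x _
    by_cases hx : nidx x = j
    · rw [hx, h, sget_set_self seen j (by omega)]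
      simp
    · rw [sget_set_ne seen j (nidx x) (by omega) (fun e => hx e.symm)]
      simp [hx]
  rw [e1, e2] at hsplit
  have hu : unseenCnt s seen = s.countP (fun c => !(sget seen (nidx c))) := rfl
  rw [hu]
  omega

theorem cnt_cons_ne (c : Char) (t : List Char) (j : Nat) (h : nidx c ≠ j) :
    cntSlot (c :: t) j = cntSlot t j := by
  rw [cntSlot_cons, if_neg h]
  omega

theorem oddU_cons_seen (c : Char) (t : List Char) (seen : List Bool)
    (hc : sget seen (nidx c) = true) :
    oddU (c :: t) seen = oddU t seen := by
  unfold oddU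
  apply List.countP_congr
  intro k hk
  by_cases hjj : nidx c = k
  · subst hjj; rw [hc]; rfl
  · rw [cnt_cons_ne c t k hjj]

theorem oddU_zero_after (c : Char) (t : List Char) (seen : List Bool) (hlen : seen.length = 26)
    (hc : sget seen (nidx c) = false)
    (hev : ∀ k, k < 26 → k ≠ nidx c → sget seen k = false →
      cntSlot (c :: t) k % 2 = 0) :
    oddU t (seen.set (nidx c) true) = 0 := by
  unfold oddU
  rw [List.countP_eq_zero]
  intro k hk
  by_cases hjj : nidx c = k
  · subst hjj; rw [sget_set_self seen _ (by rw [hlen]; exact nidx_lt c)]; simp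
  · rw [sget_set_ne seen _ _ (by rw [hlen]; exact nidx_lt c) hjj]
    cases hsk : sget seen k
    · have := hev k (List.mem_range.1 hk) (fun e => hjj e.symm) hsk
      rw [cnt_cons_ne c t k hjj] at this
      simp [this]
    · simp

theorem fset_spec (f : List Int) (hf : f.length = 26) (c : Char) (t : List Char)
    (seen : List Bool) (hlen : seen.length = 26)
    (hc : sget seen (nidx c) = false)
    (hfs : ∀ j' : Nat, j' < 26 → f.getD j' 0
      = if sget seen j' then 0 else ((cntSlot (c :: t) j' : Nat) : Int)) :
    ∀ j' : Nat, j' < 26 → (f.set (nidx c) 0).getD j' 0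
      = if sget (seen.set (nidx c) true) j' then 0
        else ((cntSlot t j' : Nat) : Int) := by
  intro j' hj'
  have hkl : nidx c < seen.length := by rw [hlen]; exact nidx_lt c
  rw [getD_set f _ _ _ _ (by rw [hf]; exact nidx_lt c)]
  by_cases hjj : nidx c = j'
  · subst hjj
    rw [if_pos rfl, if_pos (sget_set_self seen _ hkl)]
  · rw [if_neg hjj, hfs j' hj', cnt_cons_ne c t j' hjj, sget_set_ne seen _ _ hkl hjj]

theorem fB_spec (freqB : List Int) (c : Char) (t : List Char) (seen : List Bool)
    (hlen : seen.length = 26)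
    (hfB : ∀ j' : Nat, j' < 26 → sget seen j' = false →
      freqB.getD j' 0 = ((cntSlot (c :: t) j' : Nat) : Int)) :
    ∀ j' : Nat, j' < 26 →
      sget (seen.set (nidx c) true) j' = false →
      freqB.getD j' 0 = ((cntSlot t j' : Nat) : Int) := by
  intro j' hj' hns
  by_cases hjj : nidx c = j'
  · subst hjj
    rw [sget_set_self seen _ (by rw [hlen]; exact nidx_lt c)] at hns
    exact absurd hns (by simp)
  · rw [sget_set_ne seen _ _ (by rw [hlen]; exact nidx_lt c) hjj] at hns
    rw [hfB j' hj' hns, cnt_cons_ne c t j' hjj]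

-- ---- the main loop invariant ----
set_option maxHeartbeats 1600000 in
theorem loop_eq (N : Int) (freqB : List Int) (hBlen : freqB.length = 26) :
    ∀ (s : List Char) (seen : List Bool) (u : List Char) (mo : Option Char) (f : List Int)
      (L : Nat) (left right : Int),
    (∀ c ∈ s, 39 ≤ c.toNat ∧ c.toNat ≤ 90) →
    seen.length = 26 →
    f.length = 26 →
    (∀ j : Nat, j < 26 →
      f.getD j 0 = if sget seen j then 0 else ((cntSlot s j : Nat) : Int)) →
    (∀ j : Nat, j < 26 → sget seen j = false →
      freqB.getD j 0 = ((cntSlot s j : Nat) : Int)) →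
    oddU s seen ≤ (if mo.isSome then 0 else 1) →
    (mo.isSome = true → unseenCnt s seen % 2 = 0) →
    L = regLen s seen mo →
    left = (u.length : Int) →
    right = (u.length : Int) + (L : Int) - 1 →
    N = 2 * (u.length : Int) + (L : Int) →
    (s.foldl (stepA2 N) (u ++ midreg L mo ++ u.reverse, left, right, f)).1
      = (fun st : List Bool × List Char × List Char =>
          st.2.1 ++ st.2.2 ++ st.2.1.reverse) (s.foldl (stepB2 freqB) (seen, u, mo.toList)) := by
  intro s
  induction s with
  | nil =>
    intro seen u mo f L left right hs hsl hf hfs hfB hodd hpar hL hleft hright hN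
    subst hL
    cases mo <;> simp [regLen, unseenCnt, midreg]
  | cons c t ih =>
    intro seen u mo f L left right hs hsl hf hfs hfB hodd hpar hL hleft hright hN
    subst hL hleft hright
    obtain ⟨h39, h90⟩ := hs c List.mem_cons_self
    obtain ⟨ha1, ha2⟩ := idxA_range c h39 h90
    have hjlt := nidx_lt c
    have hs' : ∀ c' ∈ t, 39 ≤ c'.toNat ∧ c'.toNat ≤ 90 :=
      fun c' hc' => hs c' (List.mem_cons_of_mem _ hc')
    have hA_get : PySem.List.pyGetD f (((c.toNat : Int)) - 65) 0 = f.getD (nidx c) 0 := by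
      rw [pyGetD_mod26 f hf _ ha1 ha2, idxA_emod]
    have hBseen : PySem.List.pyGetD seen (((c.toNat : Int)) - 65) false = sget seen (nidx c) := by
      rw [pyGetD_mod26 seen hsl _ ha1 ha2, idxA_emod]; rfl
    have hBset : PySem.List.pySetD seen (((c.toNat : Int)) - 65) true = seen.set (nidx c) true := by
      rw [pySetD_mod26 seen hsl _ ha1 ha2, idxA_emod]
    have hBfreq : PySem.List.pyGetD freqB (((c.toNat : Int)) - 65) 0 = freqB.getD (nidx c) 0 := by
      rw [pyGetD_mod26 freqB hBlen _ ha1 ha2, idxA_emod]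
    rw [List.foldl_cons, List.foldl_cons]
    simp only [stepA2, stepB2]
    rw [hBseen, hBset, hBfreq, hA_get]
    cases hc : sget seen (nidx c) with
    | true =>
      have hO : f.getD (nidx c) 0 = 0 := by rw [hfs _ hjlt, if_pos hc]
      rw [hO, if_neg (by decide)]
      simp only [reduceIte]
      have hw : solveWhile c (((c.toNat : Int)) - 65)
            (u ++ midreg (regLen (c :: t) seen mo) mo ++ u.reverse) ((u.length : Int))
            ((u.length : Int) + ((regLen (c :: t) seen mo : Nat) : Int) - 1) f
          = (u ++ midreg (regLen (c :: t) seen mo) mo ++ u.reverse, ((u.length : Int)),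
             ((u.length : Int) + ((regLen (c :: t) seen mo : Nat) : Int) - 1), f) := by
        rw [solveWhile, dif_neg]
        rw [pyGetD_mod26 f hf _ ha1 ha2, idxA_emod, hO]
        simp
      rw [hw]
      have hreg : regLen (c :: t) seen mo = regLen t seen mo := by
        unfold regLen
        rw [unseenCnt_cons, if_pos hc]
        omega
      refine ih seen u mo f (regLen (c :: t) seen mo) _ _ hs' hsl hf ?_ ?_ ?_ ?_ hreg rfl rfl hN
      · intro j' hj'
        rw [hfs j' hj']
        cases hc' : sget seen j' with
        | true => rfl
        | false =>
          have hjj : nidx c ≠ j' := fun e => by rw [e] at hc; rw [hc] at hc'; cases hc'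
          rw [cnt_cons_ne c t j' hjj]
      · intro j' hj' hns
        have hjj : nidx c ≠ j' := fun e => by rw [e] at hc; rw [hc] at hns; cases hns
        rw [hfB j' hj' hns, cnt_cons_ne c t j' hjj]
      · rw [← oddU_cons_seen c t seen hc]; exact hodd
      · intro hmo
        have := hpar hmo
        rwa [unseenCnt_cons, if_pos hc] at this
    | false =>
      have hO : f.getD (nidx c) 0 = ((cntSlot (c :: t) (nidx c) : Nat) : Int) := by
        rw [hfs _ hjlt, if_neg (by rw [hc]; simp)]
      have hBO : freqB.getD (nidx c) 0 = ((cntSlot (c :: t) (nidx c) : Nat) : Int) :=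
        hfB _ hjlt hc
      have hk1 : 1 ≤ cntSlot (c :: t) (nidx c) := by rw [cntSlot_cons]; simp
      have hkleL : cntSlot (c :: t) (nidx c) ≤ unseenCnt (c :: t) seen :=
        cntSlot_le_unseen _ _ _ hc
      have hcu : unseenCnt (c :: t) seen = unseenCnt t seen + 1 := by
        rw [unseenCnt_cons, hc]
        simp
      have hct : cntSlot (c :: t) (nidx c) = cntSlot t (nidx c) + 1 := by
        rw [cntSlot_cons, if_pos rfl]
      have hua := unseen_add t seen hsl (nidx c) hjlt hc
      rw [if_neg (show ¬(false = true) from by simp)]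
      rw [hBO, PySem.List.pyRepeat_singleton, floordiv2_cast, Int.toNat_natCast, mod2_cast]
      have hfs' := fset_spec f hf c t seen hsl hc hfs
      have hfB' := fB_spec freqB c t seen hsl hfB
      have hsl' : (seen.set (nidx c) true).length = 26 := by simp [hsl]
      rcases Nat.even_or_odd (cntSlot (c :: t) (nidx c)) with hko | hko
      · -- even count: no middle write, mo unchanged
        have hke : cntSlot (c :: t) (nidx c) % 2 = 0 := Nat.even_iff.1 hko
        rw [if_neg (by rw [hO, mod2_cast, hke]; simp), if_neg (by rw [hke]; simp)]
        have hoddc : oddU (c :: t) seen = oddU t (seen.set (nidx c) true) := by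
          unfold oddU
          apply List.countP_congr
          intro k hk
          by_cases hjj : nidx c = k
          · subst hjj
            rw [hc, sget_set_self seen _ (by rw [hsl]; exact hjlt), hke]
            simp
          · rw [sget_set_ne seen _ _ (by rw [hsl]; exact hjlt) hjj, cnt_cons_ne c t k hjj]
        have hspec := solveWhile_spec c (((c.toNat : Int)) - 65) ha1 ha2
          (cntSlot (c :: t) (nidx c) / 2) u (regLen (c :: t) seen mo) mo f hf
          (by rw [idxA_emod, hO]; congr 1; omega)
          (by
            intro hmo
            have := hpar hmo
            unfold regLen
            rw [if_pos hmo]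
            omega)
          (by unfold regLen; cases mo <;> simp <;> omega)
        rw [idxA_emod] at hspec
        rw [hspec]
        refine ih (seen.set (nidx c) true)
          (u ++ List.replicate (cntSlot (c :: t) (nidx c) / 2) c) mo
          (f.set (nidx c) 0) (regLen (c :: t) seen mo - 2 * (cntSlot (c :: t) (nidx c) / 2))
          _ _ hs' hsl' (by simp [hf]) hfs' hfB' ?_ ?_ ?_ ?_ ?_ ?_
        · rw [← hoddc]; exact hodd
        · intro hmo
          have := hpar hmo
          unfold regLen at *
          omega
        · unfold regLen at *
          cases mo <;> simp at * <;> omega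
        · simp
        · simp
          unfold regLen at *
          cases mo <;> simp at * <;> omega
        · simp
          unfold regLen at *
          cases mo <;> simp at * <;> omega
      · -- odd count: middle write, mo must be none
        have hko1 : cntSlot (c :: t) (nidx c) % 2 = 1 := Nat.odd_iff.1 hko
        cases mo with
        | some ch =>
          exfalso
          have hp : ((fun (k : Nat) => !(sget seen k)
              && decide (cntSlot (c :: t) k % 2 = 1)) (nidx c)) = true := by
            simp [hc, hko1]
          have hpos : 0 < oddU (c :: t) seen :=
            List.countP_pos_iff.2 ⟨nidx c, List.mem_range.2 hjlt, hp⟩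
          simp at hodd
          omega
        | none =>
          have hev : ∀ k, k < 26 → k ≠ nidx c → sget seen k = false →
              cntSlot (c :: t) k % 2 = 0 := by
            intro k hk hkne hks
            by_contra hodd2
            have hpk : ((fun (k' : Nat) => !(sget seen k')
                && decide (cntSlot (c :: t) k' % 2 = 1)) k) = true := by
              simp [hks]
              omega
            have hpj : ((fun (k' : Nat) => !(sget seen k')
                && decide (cntSlot (c :: t) k' % 2 = 1)) (nidx c)) = true := by
              simp [hc, hko1]
            have h2 := two_le_countP (List.range 26)
              (fun (k' : Nat) => !(sget seen k')
                && decide (cntSlot (c :: t) k' % 2 = 1)) (nidx c) k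
              (List.mem_range.2 hjlt) (List.mem_range.2 hk) (fun e => hkne e.symm) hpj hpk
            have h2' : 2 ≤ oddU (c :: t) seen := h2
            simp at hodd
            omega
          have hLodd : unseenCnt (c :: t) seen % 2 = 1 :=
            unseenCnt_odd (c :: t) seen (nidx c) hjlt hc hko1 hev
          rw [if_pos (by rw [hO, mod2_cast, hko1]; rfl), if_pos (by rw [hko1]; rfl)]
          -- the middle write
          have hreg0 : regLen (c :: t) seen none = unseenCnt (c :: t) seen := by
            unfold regLen
            simp
          have hNd : PySem.Int.floordiv N 2
              = ((u.length + regLen (c :: t) seen none / 2 : Nat) : Int) := by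
            rw [hN, show (2 * ((u.length : Nat) : Int) + ((regLen (c :: t) seen none : Nat) : Int) : Int)
                = ((2 * u.length + regLen (c :: t) seen none : Nat) : Int) from by push_cast; ring,
              floordiv2_cast]
            congr 1
            omega
          have hsetmid : PySem.List.pySetD
                (u ++ midreg (regLen (c :: t) seen none) none ++ u.reverse)
                (PySem.Int.floordiv N 2) c
              = u ++ midreg (regLen (c :: t) seen none) (some c) ++ u.reverse := by
            rw [hNd, PySem.List.pySetD_of_nonneg _ _ (by positivity), Int.toNat_natCast,
              set_middle u _ _ _ (by rw [midreg_length, hreg0]; omega) c]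
            rfl
          rw [hsetmid]
          have hfup : PySem.List.pySetD f (((c.toNat : Int)) - 65) (f.getD (nidx c) 0 - 1)
              = f.set (nidx c) ((((cntSlot (c :: t) (nidx c) - 1 : Nat)) : Int)) := by
            rw [pySetD_mod26 f hf _ ha1 ha2, idxA_emod, hO]
            congr 1
            omega
          rw [hfup]
          have hspec := solveWhile_spec c (((c.toNat : Int)) - 65) ha1 ha2
            (cntSlot (c :: t) (nidx c) / 2) u (regLen (c :: t) seen none) (some c)
            (f.set (nidx c) ((((cntSlot (c :: t) (nidx c) - 1 : Nat)) : Int)))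
            (by simp [hf])
            (by rw [idxA_emod, getD_set f _ _ _ _ (by rw [hf]; exact hjlt), if_pos rfl]; congr 1; omega)
            (by intro _; rw [hreg0]; exact hLodd)
            (by rw [hreg0]; simp; omega)
          rw [idxA_emod] at hspec
          rw [hspec, List.set_set]
          refine ih (seen.set (nidx c) true)
            (u ++ List.replicate (cntSlot (c :: t) (nidx c) / 2) c) (some c)
            (f.set (nidx c) 0)
            (regLen (c :: t) seen none - 2 * (cntSlot (c :: t) (nidx c) / 2))
            _ _ hs' hsl' (by simp [hf]) hfs' hfB' ?_ ?_ ?_ ?_ ?_ ?_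
          · simp
            rw [oddU_zero_after c t seen hsl hc hev]
          · intro _
            omega
          · have hr1 : regLen t (seen.set (nidx c) true) (some c)
                = unseenCnt t (seen.set (nidx c) true) + 1 := by
              unfold regLen
              simp
            rw [hr1, hreg0]
            omega
          · simp
          · simp only [List.length_append, List.length_replicate]
            rw [hreg0]
            push_cast
            omega
          · simp only [List.length_append, List.length_replicate]
            rw [hreg0]
            rw [hreg0] at hN
            push_cast
            push_cast at hN
            omega

-- ---- bridges from the ports' pyRange folds to the char-level folds ----
theorem freq_bridge (l : List Char) :
    (PySem.List.pyRange 0 ((l.length : Int)) 1).foldl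
      (fun f i =>
        let idx : Int := (((PySem.List.pyGetD l i ' ').toNat : Int)) - 65
        PySem.List.pySetD f idx (PySem.List.pyGetD f idx 0 + 1))
      (List.replicate 26 (0 : Int))
    = l.foldl stepF (List.replicate 26 (0 : Int)) :=
  PySem.List.foldl_pyRange_zero_pyGetD' l ' ' stepF (List.replicate 26 (0 : Int))

theorem cnt_bridge (F : List Int) (hF : F.length = 26) :
    (PySem.List.pyRange 0 26 1).foldl
      (fun cnt i => if PySem.Int.mod (PySem.List.pyGetD F i 0) 2 ≠ 0 then cnt + 1 else cnt) 0
    = ((F.countP (fun x => decide (PySem.Int.mod x 2 ≠ 0)) : Nat) : Int) := by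
  rw [show (26:Int) = ((F.length : Nat) : Int) by rw [hF]; simp]
  rw [PySem.List.foldl_pyRange_zero_pyGetD' F 0
    (fun cnt x => if PySem.Int.mod x 2 ≠ 0 then cnt + 1 else cnt) 0]
  rw [PySem.List.foldl_ite_add_one (fun x => PySem.Int.mod x 2 ≠ 0) F 0]
  norm_num

theorem main_bridge (l : List Char) (N : Int) (init : List Char × Int × Int × List Int) :
    (PySem.List.pyRange 0 ((l.length : Int)) 1).foldl
      (fun (st : List Char × Int × Int × List Int) i =>
        let (ans, left, right, f) := st
        let c := PySem.List.pyGetD l i ' '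
        let idx : Int := ((c.toNat : Int)) - 65
        let (ans, f) :=
          if PySem.Int.mod (PySem.List.pyGetD f idx 0) 2 = 1 then
            (PySem.List.pySetD ans (PySem.Int.floordiv N 2) c,
             PySem.List.pySetD f idx (PySem.List.pyGetD f idx 0 - 1))
          else (ans, f)
        solveWhile c idx ans left right f) init
    = l.foldl (stepA2 N) init :=
  PySem.List.foldl_pyRange_zero_pyGetD' l ' ' (stepA2 N) init

-- ===== VERDICT (by name: the statement is the Claim_ definition above) =====
theorem solve_spec : Claim_equal_solve := by
  intro S _ hpre
  have hs : ∀ c ∈ S.toList, 39 ≤ c.toNat ∧ c.toNat ≤ 90 := fun c hc =>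
    of_decide_eq_true (List.all_eq_true.1 hpre c hc)
  unfold Spec_solve solve solve_alt
  have hb1 := freq_bridge S.toList
  have hb3 := main_bridge S.toList ((S.toList.length : Nat) : Int)
  simp only [] at hb1 hb3 ⊢
  rw [hb1]
  rw [show (fun (f : List Int) (c : Char) =>
      PySem.List.pySetD f ((c.toNat : Int) - 65)
        (PySem.List.pyGetD f ((c.toNat : Int) - 65) 0 + 1)) = stepF from rfl]
  set F : List Int := S.toList.foldl stepF (List.replicate 26 0) with hFdef
  have hFlen : F.length = 26 := by rw [hFdef, freq_fold_len]; simp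
  have hFget : ∀ j : Nat, j < 26 → F.getD j 0 = ((cntSlot S.toList j : Nat) : Int) := by
    intro j hj
    rw [hFdef, freq_fold_getD S.toList _ (by simp) hs j hj]
    have : (List.replicate 26 (0 : Int)).getD j 0 = 0 := by
      rw [List.getD_eq_getElem?_getD, List.getElem?_replicate]
      split_ifs <;> rfl
    rw [this]
    ring
  rw [cnt_bridge F hFlen, sum_mod_eq_countP F]
  by_cases hcnt : 1 < ((F.countP (fun x => decide (PySem.Int.mod x 2 ≠ 0)) : Nat) : Int)
  · rw [if_pos hcnt, if_pos hcnt]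
  · rw [if_neg hcnt, if_neg hcnt]
    rw [hb3]
    have hoddinit : oddU S.toList (List.replicate 26 false)
        = F.countP (fun x => decide (PySem.Int.mod x 2 ≠ 0)) := by
      rw [list_countP_index F _, hFlen]
      apply List.countP_congr
      intro k hk
      have hk26 := List.mem_range.1 hk
      rw [hFget k hk26, mod2_cast, sget_replicate]
      rcases Nat.even_or_odd (cntSlot S.toList k) with he | he
      · have h0 := Nat.even_iff.1 he
        rw [h0]
        simp
      · have h1 := Nat.odd_iff.1 he
        rw [h1]
        simp
    have hunseen : unseenCnt S.toList (List.replicate 26 false) = S.toList.length := by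
      unfold unseenCnt
      have : (fun (c : Char) => !(sget (List.replicate 26 false) (nidx c))) = fun _ => true := by
        funext c
        rw [sget_replicate]
        rfl
      rw [this]
      exact congrFun List.countP_true S.toList
    have hloop := loop_eq ((S.toList.length : Nat) : Int) F hFlen S.toList
      (List.replicate 26 false) [] none F S.toList.length 0 (((S.toList.length : Nat) : Int) - 1)
      hs (by simp) hFlen
      (fun j hj => by rw [hFget j hj, sget_replicate]; rfl)
      (fun j hj _ => hFget j hj)
      (by
        rw [show ((none : Option Char)).isSome = false from rfl,
          if_neg (show ¬(false = true) from by simp), hoddinit]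
        omega)
      (by intro h; cases h)
      (by
        unfold regLen
        rw [hunseen]
        simp)
      (by simp)
      (by simp)
      (by simp)
    rw [show List.replicate S.toList.length ' '
        = [] ++ midreg S.toList.length none ++ ([] : List Char).reverse from by simp [midreg]]
    exact congrArg String.ofList (hloop.trans rfl)
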